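-- pv_equiv track=rewrite | github.com/ejpark78/nlp-utils | etl/utils/quote_utils.py | get_content_len_index
-- ===== SOURCE A (Python) =====
-- def get_content_len_index(text_list):
--     """ 본문을 길이 단위로 분리한 정보를 저장한다."""
--     len_index = []
--
--     for p in text_list:
--         if len(len_index) == 0:
--             len_index.append(len(p))
--             continue
--
--         len_index.append(len(p) + len_index[-1])
--
--     return len_index
-- ===== SOURCE B (Python) =====
-- def get_content_len_index(text_list):
--     total = sum(len(p) for p in text_list)
--     out = []
--     for p in reversed(text_list):
--         out.append(total)
--         total -= len(p)
--     out.reverse()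
--     return out
-- ===== Notes on version B (the rewrite author's own statement) =====
-- stated objective: alternative
-- what changed: Instead of a forward loop carrying a running accumulator, B computes the grand total of lengths first and then walks the list backwards, emitting the running total and subtracting each length, reversing the collected list at the end (suffix-subtraction instead of prefix-accumulation).
import Mathlib
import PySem

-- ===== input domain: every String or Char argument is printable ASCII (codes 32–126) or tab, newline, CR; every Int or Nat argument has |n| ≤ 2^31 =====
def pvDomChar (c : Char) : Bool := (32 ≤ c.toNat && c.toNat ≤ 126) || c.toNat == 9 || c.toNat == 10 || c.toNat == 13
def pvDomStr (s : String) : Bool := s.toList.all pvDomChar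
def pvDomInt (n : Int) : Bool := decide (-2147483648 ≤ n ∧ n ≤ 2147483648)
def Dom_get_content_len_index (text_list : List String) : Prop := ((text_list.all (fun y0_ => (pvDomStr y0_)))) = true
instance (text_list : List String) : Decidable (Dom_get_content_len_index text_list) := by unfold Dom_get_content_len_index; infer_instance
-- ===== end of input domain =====

-- B replaces A's forward running-accumulator loop (with its first-element special case)
-- by a two-pass suffix-subtraction: total of all lengths first, then a backward walk
-- emitting the running total and subtracting each length, reversed at the end. Same cost.

-- ===== PORT A =====
def get_content_len_index (text_list : List String) : List Int :=
  text_list.foldl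
    (fun len_index p =>
      if len_index.length = 0 then
        len_index ++ [PySem.Str.len p]
      else
        len_index ++ [PySem.Str.len p + PySem.List.pyGetD len_index (-1) 0])
    []

-- ===== PORT B =====
def get_content_len_index_alt (text_list : List String) : List Int :=
  (text_list.reverse.foldl
    (fun (st : List Int × Int) p => (st.1 ++ [st.2], st.2 - PySem.Str.len p))
    ([], text_list.foldl (fun acc p => acc + PySem.Str.len p) 0)).1.reverse

-- ===== PRECONDITION & SPEC =====
def Spec_get_content_len_index (text_list : List String) (out : List Int) : Prop := out = get_content_len_index_alt text_list
instance (text_list : List String) (out : List Int) : Decidable (Spec_get_content_len_index text_list out) := by unfold Spec_get_content_len_index; infer_instance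

-- ===== CLAIM (what is proved, stated in full; the proofs are below) =====
def Claim_equal_get_content_len_index : Prop := ∀ (text_list : List String), Dom_get_content_len_index text_list → Spec_get_content_len_index text_list (get_content_len_index text_list)

-- ===== LEMMAS AND PROOFS =====

-- forward prefix sums (reference characterisation of A's loop)
def pvAcc (t : Int) : List Int → List Int
  | [] => []
  | x :: xs => (t + x) :: pvAcc (t + x) xs

-- backward descending totals (reference characterisation of B's loop), over strings
def pvDesc (t : Int) : List String → List Int
  | [] => []
  | p :: ps => t :: pvDesc (t - PySem.Str.len p) ps

theorem foldl_step_acc (xs : List String) : ∀ (acc : List Int),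
    xs.foldl
      (fun len_index p =>
        if len_index.length = 0 then
          len_index ++ [PySem.Str.len p]
        else
          len_index ++ [PySem.Str.len p + PySem.List.pyGetD len_index (-1) 0])
      acc
    = acc ++ pvAcc (PySem.List.pyGetD acc (-1) 0) (xs.map (fun p => PySem.Str.len p)) := by
  induction xs with
  | nil => intro acc; simp [pvAcc]
  | cons p rest ih =>
    intro acc
    have hstep : (if acc.length = 0 then acc ++ [PySem.Str.len p]
        else acc ++ [PySem.Str.len p + PySem.List.pyGetD acc (-1) 0])
        = acc ++ [PySem.List.pyGetD acc (-1) 0 + PySem.Str.len p] := by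
      split_ifs with h
      · have : acc = [] := List.eq_nil_of_length_eq_zero h
        subst this
        simp [PySem.List.pyGetD, PySem.List.pyGet?, PySem.List.pyIdx?]
      · rw [Int.add_comm]
    simp only [List.foldl_cons, List.map_cons, hstep, ih]
    have hlast : PySem.List.pyGetD (acc ++ [PySem.List.pyGetD acc (-1) 0 + PySem.Str.len p]) (-1) 0
        = PySem.List.pyGetD acc (-1) 0 + PySem.Str.len p := by
      simp [PySem.List.pyGetD, PySem.List.pyGet?_neg_one_append_singleton]
    rw [hlast, pvAcc]
    simp

theorem foldl_step_desc (ps : List String) : ∀ (out : List Int) (t : Int),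
    (ps.foldl (fun (st : List Int × Int) p => (st.1 ++ [st.2], st.2 - PySem.Str.len p)) (out, t)).1
    = out ++ pvDesc t ps := by
  induction ps with
  | nil => intro out t; simp [pvDesc]
  | cons p rest ih =>
    intro out t
    simp only [List.foldl_cons]
    rw [ih]
    simp [pvDesc]

theorem pvDesc_append (x : String) (rs : List String) : ∀ (t : Int),
    pvDesc t (rs ++ [x]) = pvDesc t rs ++ [t - (rs.map (fun p => PySem.Str.len p)).sum] := by
  induction rs with
  | nil => intro t; simp [pvDesc]
  | cons y ys ih =>
    intro t
    simp only [List.cons_append, pvDesc, ih, List.map_cons, List.sum_cons]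
    rw [sub_sub]

theorem pvAcc_reverse (xs : List String) : ∀ (a : Int),
    (pvAcc a (xs.map (fun p => PySem.Str.len p))).reverse
    = pvDesc (a + (xs.map (fun p => PySem.Str.len p)).sum) xs.reverse := by
  induction xs with
  | nil => intro a; simp [pvAcc, pvDesc]
  | cons x ys ih =>
    intro a
    simp only [List.map_cons, pvAcc, List.reverse_cons, List.sum_cons, ih, pvDesc_append,
      List.map_reverse, List.sum_reverse]
    congr 1
    · ring_nf
    · congr 1; ring

theorem foldl_len_sum (xs : List String) : ∀ (a : Int),
    xs.foldl (fun acc p => acc + PySem.Str.len p) a = a + (xs.map (fun p => PySem.Str.len p)).sum := by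
  induction xs with
  | nil => intro a; simp
  | cons x ys ih =>
    intro a
    simp only [List.foldl_cons]
    rw [ih]
    simp only [List.map_cons, List.sum_cons]
    ring

-- ===== VERDICT (by name: the statement is the Claim_ definition above) =====
theorem get_content_len_index_spec : Claim_equal_get_content_len_index := by
  intro text_list _
  unfold Spec_get_content_len_index get_content_len_index get_content_len_index_alt
  rw [foldl_step_acc, foldl_step_desc, foldl_len_sum]
  simp only [List.nil_append, Int.zero_add]
  have := pvAcc_reverse text_list (PySem.List.pyGetD ([] : List Int) (-1) 0)
  have h0 : PySem.List.pyGetD ([] : List Int) (-1) 0 = 0 := by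
    simp [PySem.List.pyGetD, PySem.List.pyGet?, PySem.List.pyIdx?]
  rw [h0] at this
  simp only [Int.zero_add] at this
  rw [h0, ← List.reverse_reverse (pvAcc 0 (text_list.map (fun p => PySem.Str.len p))), this]
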